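-- pv_equiv track=rewrite | github.com/sc84669040/self-media-workbench | apps/creative-studio/scripts/creation_service.py | _pick_primary_packet_article_index
-- ===== SOURCE A (Python) =====
-- from typing import Any
--
-- MIN_CITABLE_BODY_LENGTH = 8
--
-- def _pick_primary_packet_article_index(articles: list[dict[str, Any]]) -> int:
--     for index, article in enumerate(articles):
--         if str(article.get("evidence_role") or "").strip().lower() == "primary":
--             return index
--     for index, article in enumerate(articles):
--         body_text = str(article.get("body_text") or "").strip()
--         if len(body_text) >= MIN_CITABLE_BODY_LENGTH:
--             return index
--     return 0
-- ===== SOURCE B (Python) =====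
-- MIN_CITABLE_BODY_LENGTH = 8
--
-- def _pick_primary_packet_article_index(articles):
--     first_citable = None
--     for index, article in enumerate(articles):
--         if str(article.get("evidence_role") or "").strip().lower() == "primary":
--             return index
--         if first_citable is None and len(str(article.get("body_text") or "").strip()) >= MIN_CITABLE_BODY_LENGTH:
--             first_citable = index
--     return first_citable if first_citable is not None else 0
-- ===== Notes on version B (the rewrite author's own statement) =====
-- stated objective: alternative
-- what changed: A's two sequential enumerate passes over the articles are fused into a single pass that remembers the first citable index while still scanning for a primary article.
import Mathlib
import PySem

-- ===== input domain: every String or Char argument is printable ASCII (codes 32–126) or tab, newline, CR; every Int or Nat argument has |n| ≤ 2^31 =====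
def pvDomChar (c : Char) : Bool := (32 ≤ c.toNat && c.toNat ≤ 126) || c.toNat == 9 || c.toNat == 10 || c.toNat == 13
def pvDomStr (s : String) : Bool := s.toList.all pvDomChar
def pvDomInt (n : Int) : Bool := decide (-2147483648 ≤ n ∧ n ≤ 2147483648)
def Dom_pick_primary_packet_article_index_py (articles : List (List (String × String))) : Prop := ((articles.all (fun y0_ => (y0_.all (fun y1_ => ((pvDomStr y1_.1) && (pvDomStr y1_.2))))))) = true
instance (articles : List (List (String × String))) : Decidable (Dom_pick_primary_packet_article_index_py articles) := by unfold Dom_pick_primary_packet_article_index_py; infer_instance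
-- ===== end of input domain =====

-- B fuses A's two sequential passes into one pass that remembers the first citable index (alternative decomposition; return value identical).

-- str(article.get(k) or "").strip()  (dict lookup = first match in the association list; a missing key or "" both give "")
def pvStripped (article : List (String × String)) (k : String) : String :=
  PySem.Str.strip (((article.find? (fun p => p.1 == k)).map Prod.snd).getD "")

def pvIsPrimary (article : List (String × String)) : Bool :=
  PySem.Str.lower (pvStripped article "evidence_role") == "primary"

def pvIsCitable (article : List (String × String)) : Bool :=
  PySem.Str.len (pvStripped article "body_text") ≥ 8

-- ===== PORT A =====
-- first loop of A: first index whose evidence_role normalizes to "primary"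
def pvLoop1 (articles : List (List (String × String))) (i : Int) : Option Int :=
  match articles with
  | [] => none
  | a :: rest => if pvIsPrimary a then some i else pvLoop1 rest (i + 1)

-- second loop of A: first index with a long enough stripped body_text
def pvLoop2 (articles : List (List (String × String))) (i : Int) : Option Int :=
  match articles with
  | [] => none
  | a :: rest => if pvIsCitable a then some i else pvLoop2 rest (i + 1)

def pick_primary_packet_article_index_py (articles : List (List (String × String))) : Int :=
  match pvLoop1 articles 0 with
  | some i => i
  | none =>
    match pvLoop2 articles 0 with
    | some i => i
    | none => 0

-- ===== PORT B =====
-- single pass with retained state first_citable (fc)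
def pvLoopB (articles : List (List (String × String))) (i : Int) (fc : Option Int) : Int :=
  match articles with
  | [] => fc.getD 0
  | a :: rest =>
    if pvIsPrimary a then i
    else if fc.isNone && pvIsCitable a then pvLoopB rest (i + 1) (some i)
    else pvLoopB rest (i + 1) fc

def pick_primary_packet_article_index_py_alt (articles : List (List (String × String))) : Int :=
  pvLoopB articles 0 none

-- ===== PRECONDITION & SPEC =====
def Spec_pick_primary_packet_article_index_py (articles : List (List (String × String))) (out : Int) : Prop := out = pick_primary_packet_article_index_py_alt articles
instance (articles : List (List (String × String))) (out : Int) : Decidable (Spec_pick_primary_packet_article_index_py articles out) := by unfold Spec_pick_primary_packet_article_index_py; infer_instance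

-- ===== CLAIM (what is proved, stated in full; the proofs are below) =====
def Claim_equal_pick_primary_packet_article_index_py : Prop := ∀ (articles : List (List (String × String))), Dom_pick_primary_packet_article_index_py articles → Spec_pick_primary_packet_article_index_py articles (pick_primary_packet_article_index_py articles)

-- ===== LEMMAS AND PROOFS =====

-- the single pass equals: primary wins from position i, else the retained fc, else the first citable from i, else 0
theorem pvLoopB_eq (articles : List (List (String × String))) :
    ∀ (i : Int) (fc : Option Int),
      pvLoopB articles i fc =
        match pvLoop1 articles i with
        | some j => j
        | none =>
          match fc with
          | some k => k
          | none => (pvLoop2 articles i).getD 0 := by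
  induction articles with
  | nil => intro i fc; cases fc <;> simp [pvLoopB, pvLoop1, pvLoop2]
  | cons a rest ih =>
    intro i fc
    by_cases hp : pvIsPrimary a
    · simp [pvLoopB, pvLoop1, hp]
    · by_cases hc : pvIsCitable a
      · cases fc with
        | none => simp [pvLoopB, pvLoop1, pvLoop2, hp, hc, ih]
        | some k => simp [pvLoopB, pvLoop1, hp, hc, ih]
      · cases fc <;> simp [pvLoopB, pvLoop1, pvLoop2, hp, hc, ih]

-- ===== VERDICT (by name: the statement is the Claim_ definition above) =====
theorem pick_primary_packet_article_index_py_spec : Claim_equal_pick_primary_packet_article_index_py := by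
  intro articles _
  unfold Spec_pick_primary_packet_article_index_py
  unfold pick_primary_packet_article_index_py pick_primary_packet_article_index_py_alt
  rw [pvLoopB_eq]
  cases pvLoop1 articles 0 <;> cases pvLoop2 articles 0 <;> simp
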